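-- pv_equiv track=rewrite | github.com/yangjianfeng1208/dlstreamer | scripts/optimizer/processors/inference.py | add_instance_ids
-- ===== SOURCE A (Python) =====
-- def add_instance_ids(pipeline): # pylint: disable=missing-function-docstring
--     ids = {}
--     index = 0
--
--     for idx, element in enumerate(pipeline):
--         if "gvadetect" in element or "gvaclassify" in element:
--             (element_type, parameters) = parse_element_parameters(element)
--             instance_id = ids.get(parameters["model"])
--
--             if not instance_id:
--                 instance_id = "inf" + str(index)
--                 index += 1
--                 ids[parameters["model"]] = instance_id
--
--             parameters["model-instance-id"] = instance_id
--             parameters = assemble_parameters(parameters)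
--             pipeline[idx] = f" {element_type} {parameters} "
--
--     return pipeline
--
-- def parse_element_parameters(element):
--     parameters = element.strip().split(" ")
--     parsed_parameters = {}
--     for parameter in parameters[1:]:
--         parts = parameter.split("=")
--         parsed_parameters[parts[0]] = parts[1]
--
--     return (parameters[0], parsed_parameters)
--
-- def assemble_parameters(parameters):
--     result = ""
--     for parameter, value in parameters.items():
--         result = result + parameter + "=" + value + " "
--
--     return result
-- ===== SOURCE B (Python) =====
-- def _split_element(element):
--     tokens = element.strip().split(" ")
--     return tokens[0], {t.split("=")[0]: t.split("=")[1] for t in tokens[1:]}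
--
--
-- def add_instance_ids(pipeline):
--     # pass 1: register each model under 'inf<n>' in first-appearance order
--     ids = {}
--     for element in pipeline:
--         if "gvadetect" in element or "gvaclassify" in element:
--             model = _split_element(element)[1]["model"]
--             if model not in ids:
--                 ids[model] = "inf" + str(len(ids))
--     # pass 2: rewrite every matching element in place using the complete map
--     for idx, element in enumerate(pipeline):
--         if "gvadetect" in element or "gvaclassify" in element:
--             head, params = _split_element(element)
--             params["model-instance-id"] = ids[params["model"]]
--             body = "".join(k + "=" + v + " " for k, v in params.items())
--             pipeline[idx] = " " + head + " " + body + " "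
--     return pipeline
-- ===== Notes on version B (the rewrite author's own statement) =====
-- stated objective: alternative
-- what changed: A makes one pass growing the model->id dict as it rewrites; B splits the work into a registration pass that builds the complete model->'inf<n>' map first and a second pass that rewrites each matching element from that map.
import Mathlib
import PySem

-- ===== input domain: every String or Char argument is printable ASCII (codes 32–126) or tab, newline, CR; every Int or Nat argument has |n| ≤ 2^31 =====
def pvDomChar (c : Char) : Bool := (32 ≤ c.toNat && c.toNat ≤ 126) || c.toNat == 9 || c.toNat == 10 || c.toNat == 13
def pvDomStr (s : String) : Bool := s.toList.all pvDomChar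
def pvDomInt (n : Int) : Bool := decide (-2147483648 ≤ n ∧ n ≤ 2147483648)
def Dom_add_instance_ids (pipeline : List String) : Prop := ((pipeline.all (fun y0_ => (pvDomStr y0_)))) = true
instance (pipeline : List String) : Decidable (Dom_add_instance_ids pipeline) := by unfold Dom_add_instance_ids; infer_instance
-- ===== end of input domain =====

-- B replaces A's single pass with an incrementally grown id dict by two passes — first register every
-- model's 'inf<n>' id, then rewrite each matching element from the completed map (alternative
-- decomposition, same cost). A mutates `pipeline` in place and returns it; the equivalence proved
-- here is about the RETURN value (B performs the same in-place mutation in Python).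

-- ===== PORT A =====
-- parse_element_parameters: strip, split on " ", params[1:] into a dict via parts of split on "="
-- (Python raises IndexError when a token has no "=", KeyError below when "model" is absent: those
-- inputs are excluded by Pre_; the `.getD ""` defaults are reached only outside Pre_)
def parseElementParameters (element : String) : String × PySem.Dict String String :=
  let parameters := (PySem.Str.split? (PySem.Str.strip element) " ").getD []
  let parsedParameters := (parameters.drop 1).foldl
    (fun d parameter =>
      let parts := (PySem.Str.split? parameter "=").getD []
      d.insert ((PySem.List.pyGet? parts 0).getD "") ((PySem.List.pyGet? parts 1).getD ""))
    PySem.Dict.empty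
  ((PySem.List.pyGet? parameters 0).getD "", parsedParameters)

def assembleParameters (parameters : PySem.Dict String String) : String :=
  parameters.items.foldl (fun result kv => result ++ kv.1 ++ "=" ++ kv.2 ++ " ") ""

-- Python truthiness of Optional[str]: None and "" are falsy
def pyFalsyOptStr : Option String → Bool
  | none => true
  | some s => s == ""

def addInstanceIdsLoop (ids : PySem.Dict String String) (index : Int) : List String → List String
  | [] => []
  | element :: rest =>
    if PySem.Str.isIn "gvadetect" element || PySem.Str.isIn "gvaclassify" element then
      let ep := parseElementParameters element
      let m := (ep.2.get? "model").getD ""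
      if pyFalsyOptStr (ids.get? m) then
        let instanceId := "inf" ++ PySem.Int.toStr index
        (" " ++ ep.1 ++ " " ++ assembleParameters (ep.2.insert "model-instance-id" instanceId) ++ " ")
          :: addInstanceIdsLoop (ids.insert m instanceId) (index + 1) rest
      else
        let instanceId := (ids.get? m).getD ""
        (" " ++ ep.1 ++ " " ++ assembleParameters (ep.2.insert "model-instance-id" instanceId) ++ " ")
          :: addInstanceIdsLoop ids index rest
    else element :: addInstanceIdsLoop ids index rest

def add_instance_ids (pipeline : List String) : List String :=
  addInstanceIdsLoop PySem.Dict.empty 0 pipeline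

-- ===== PORT B =====
-- _split_element of Source B (the dict comprehension is the same insert-fold)
def bSplitElement (element : String) : String × PySem.Dict String String :=
  let tokens := (PySem.Str.split? (PySem.Str.strip element) " ").getD []
  ((PySem.List.pyGet? tokens 0).getD "",
   (tokens.drop 1).foldl
     (fun d t =>
       let parts := (PySem.Str.split? t "=").getD []
       d.insert ((PySem.List.pyGet? parts 0).getD "") ((PySem.List.pyGet? parts 1).getD ""))
     PySem.Dict.empty)

-- pass 1 of Source B: register each model at first appearance
def bRegisterStep (ids : PySem.Dict String String) (element : String) : PySem.Dict String String :=
  if PySem.Str.isIn "gvadetect" element || PySem.Str.isIn "gvaclassify" element then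
    if ids.contains (((bSplitElement element).2.get? "model").getD "") then ids
    else ids.insert (((bSplitElement element).2.get? "model").getD "")
           ("inf" ++ PySem.Int.toStr (ids.size : Int))
  else ids

-- pass 2 of Source B: rewrite one element from the completed map
def bRender (ids : PySem.Dict String String) (element : String) : String :=
  if PySem.Str.isIn "gvadetect" element || PySem.Str.isIn "gvaclassify" element then
    let hp := bSplitElement element
    let params := hp.2.insert "model-instance-id" ((ids.get? ((hp.2.get? "model").getD "")).getD "")
    " " ++ hp.1 ++ " " ++
      PySem.Str.join "" (params.items.map (fun kv => kv.1 ++ "=" ++ kv.2 ++ " ")) ++ " "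
  else element

def add_instance_ids_alt (pipeline : List String) : List String :=
  pipeline.map (bRender (pipeline.foldl bRegisterStep PySem.Dict.empty))

-- ===== PRECONDITION & SPEC =====
-- Pre_ excludes exactly the inputs on which Python A raises: a matching element whose parameter
-- token lacks "=" (IndexError on parts[1]) or whose tokens define no "model" key (KeyError).
def Pre_add_instance_ids (pipeline : List String) : Prop :=
  ∀ element ∈ pipeline,
    (PySem.Str.isIn "gvadetect" element || PySem.Str.isIn "gvaclassify" element) = true →
      ((∀ t ∈ ((PySem.Str.split? (PySem.Str.strip element) " ").getD []).drop 1,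
          2 ≤ ((PySem.Str.split? t "=").getD []).length) ∧
       (∃ t ∈ ((PySem.Str.split? (PySem.Str.strip element) " ").getD []).drop 1,
          (PySem.List.pyGet? ((PySem.Str.split? t "=").getD []) 0).getD "" = "model"))
instance (pipeline : List String) : Decidable (Pre_add_instance_ids pipeline) := by
  unfold Pre_add_instance_ids; infer_instance

def pvWitness_add_instance_ids : List String :=
  ["decodebin", " gvadetect model=m1 th=0.5 ", "gvaclassify model=m2", "gvadetect model=m1"]

def Spec_add_instance_ids (pipeline : List String) (out : List String) : Prop :=
  out = add_instance_ids_alt pipeline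
instance (pipeline : List String) (out : List String) : Decidable (Spec_add_instance_ids pipeline out) := by
  unfold Spec_add_instance_ids; infer_instance

-- ===== CLAIM (what is proved, stated in full; the proofs are below) =====
def Claim_equal_add_instance_ids : Prop :=
  ∀ (pipeline : List String), Dom_add_instance_ids pipeline → Pre_add_instance_ids pipeline →
    Spec_add_instance_ids pipeline (add_instance_ids pipeline)

-- ===== LEMMAS AND PROOFS =====

-- the two parsers are the same computation
theorem bSplit_eq (element : String) : bSplitElement element = parseElementParameters element := rfl

-- "inf…" ids are never the empty string
theorem inf_ne_empty (s : String) : "inf" ++ s ≠ "" := by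
  intro h
  have h2 := congrArg String.toList h
  simp at h2

-- pass 1 never overwrites: once a key is present its value survives the rest of the pass
theorem register_preserves (l : List String) (d : PySem.Dict String String) (k : String)
    (hk : d.contains k = true) :
    (l.foldl bRegisterStep d).get? k = d.get? k := by
  induction l generalizing d with
  | nil => rfl
  | cons e rest ih =>
    rw [List.foldl_cons]
    by_cases hg : (PySem.Str.isIn "gvadetect" e || PySem.Str.isIn "gvaclassify" e) = true
    · by_cases hm : d.contains (((bSplitElement e).2.get? "model").getD "") = true
      · rw [show bRegisterStep d e = d by simp only [bRegisterStep, hg, hm, if_true]]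
        exact ih d hk
      · have hne : k ≠ ((bSplitElement e).2.get? "model").getD "" := by
          intro h; rw [h] at hk; exact hm hk
        have hm' : d.contains (((bSplitElement e).2.get? "model").getD "") = false :=
          Bool.not_eq_true _ ▸ eq_false_of_ne_true hm
        rw [show bRegisterStep d e
              = d.insert (((bSplitElement e).2.get? "model").getD "")
                  ("inf" ++ PySem.Int.toStr (d.size : Int)) by
            simp only [bRegisterStep, hg, hm', if_true, if_false, Bool.false_eq_true]]
        rw [ih _ (by simp [PySem.Dict.contains_insert, hk])]
        exact PySem.Dict.get?_insert_of_ne _ _ hne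
    · have hg' : (PySem.Str.isIn "gvadetect" e || PySem.Str.isIn "gvaclassify" e) = false :=
        Bool.not_eq_true _ ▸ eq_false_of_ne_true hg
      rw [show bRegisterStep d e = d by
        simp only [bRegisterStep, hg', if_false, Bool.false_eq_true]]
      exact ih d hk

-- Str.join with the empty separator concatenates
theorem join_empty_cons (x : String) (xs : List String) :
    PySem.Str.join "" (x :: xs) = x ++ PySem.Str.join "" xs := by
  simp only [PySem.Str.join, PySem.Chars.join, List.map_cons,
    show "".toList = ([] : List Char) from rfl]
  rw [show ([] : List Char).intercalate (x.toList :: List.map String.toList xs)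
        = x.toList ++ ([] : List Char).intercalate (List.map String.toList xs) from by
      cases xs <;> simp [List.intercalate]]
  rw [String.ofList_append, String.ofList_toList]

-- string assembly: A's fold-concat equals B's join of "k=v " pieces
theorem assemble_eq_join (l : List (String × String)) (r : String) :
    l.foldl (fun result kv => result ++ kv.1 ++ "=" ++ kv.2 ++ " ") r
      = r ++ PySem.Str.join "" (l.map (fun kv => kv.1 ++ "=" ++ kv.2 ++ " ")) := by
  induction l generalizing r with
  | nil => simp [PySem.Str.join]
  | cons kv rest ih =>
    simp only [List.foldl_cons, List.map_cons, ih, join_empty_cons]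
    simp [String.append_assoc]

-- assembleParameters as a join of "k=v " pieces
theorem assemble_eq (d : PySem.Dict String String) :
    assembleParameters d
      = PySem.Str.join "" (d.items.map (fun kv => kv.1 ++ "=" ++ kv.2 ++ " ")) := by
  unfold assembleParameters
  rw [assemble_eq_join]
  simp

-- the value invariant: every id stored so far is non-empty
def ValsNonempty (d : PySem.Dict String String) : Prop :=
  ∀ k s, d.get? k = some s → s ≠ ""

-- the main loop invariant: A's one pass with the growing dict equals B's render pass
-- with the dict pass 1 completes from A's current state
theorem loop_eq (rest : List String) (ids : PySem.Dict String String) (index : Int)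
    (hidx : index = (ids.size : Int)) (hv : ValsNonempty ids) :
    addInstanceIdsLoop ids index rest = rest.map (bRender (rest.foldl bRegisterStep ids)) := by
  induction rest generalizing ids index with
  | nil => rfl
  | cons e rest ih =>
    by_cases hg : (PySem.Str.isIn "gvadetect" e || PySem.Str.isIn "gvaclassify" e) = true
    · set m := ((parseElementParameters e).2.get? "model").getD "" with hm_def
      have hreg : bRegisterStep ids e
          = (if ids.contains m then ids
             else ids.insert m ("inf" ++ PySem.Int.toStr (ids.size : Int))) := by
        simp only [bRegisterStep, hg, if_true]; rfl
      by_cases hc : ids.contains m = true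
      · -- model already registered: A takes the truthy branch, pass 1 leaves ids unchanged
        obtain ⟨s, hs⟩ : ∃ s, ids.get? m = some s := by
          rw [PySem.Dict.contains_eq_isSome_get?] at hc
          exact Option.isSome_iff_exists.mp hc
        have hsne : s ≠ "" := hv m s hs
        have hfalsy : pyFalsyOptStr (ids.get? m) = false := by
          simp [pyFalsyOptStr, hs, hsne]
        have hF : (List.foldl bRegisterStep ids rest).get? m = some s := by
          rw [register_preserves rest ids m hc]; exact hs
        simp only [addInstanceIdsLoop, hg, if_true, List.foldl_cons, List.map_cons,
          hreg, hc, ← hm_def, hfalsy, Bool.false_eq_true, if_false]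
        simp only [List.cons.injEq]
        refine ⟨?_, ?_⟩
        · simp only [bRender, hg, if_true, bSplit_eq, ← hm_def, hF,
            Option.getD_some, hs]
          rw [assemble_eq]
        · exact ih ids index hidx hv
      · -- fresh model: A inserts "inf<index>", pass 1 inserts "inf<len ids>" — the same id
        have hc' : ids.contains m = false := Bool.not_eq_true _ ▸ eq_false_of_ne_true hc
        have hn : ids.get? m = none := by
          rw [PySem.Dict.contains_eq_isSome_get?] at hc'
          exact Option.not_isSome_iff_eq_none.mp (by simp [hc'])
        have hfalsy : pyFalsyOptStr (ids.get? m) = true := by simp [pyFalsyOptStr, hn]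
        have hval : "inf" ++ PySem.Int.toStr index = "inf" ++ PySem.Int.toStr (ids.size : Int) := by
          rw [hidx]
        set v := "inf" ++ PySem.Int.toStr (ids.size : Int) with hv_def
        have hidx' : index + 1 = ((ids.insert m v).size : Int) := by
          rw [PySem.Dict.size_insert, hc']
          simp [hidx]
        have hv' : ValsNonempty (ids.insert m v) := by
          intro k s hk
          rcases eq_or_ne k m with h | h
          · rw [h, PySem.Dict.get?_insert_self] at hk
            exact (Option.some_inj.mp hk) ▸ inf_ne_empty _
          · rw [PySem.Dict.get?_insert_of_ne _ _ h] at hk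
            exact hv k s hk
        have hF : (List.foldl bRegisterStep (ids.insert m v) rest).get? m = some v := by
          rw [register_preserves rest _ m (by simp)]
          exact PySem.Dict.get?_insert_self _ _ _
        simp only [addInstanceIdsLoop, hg, if_true, List.foldl_cons, List.map_cons,
          hreg, hc', ← hm_def, hfalsy, Bool.false_eq_true, if_false, hval]
        simp only [List.cons.injEq]
        refine ⟨?_, ?_⟩
        · simp only [bRender, hg, if_true, bSplit_eq, ← hm_def, hF,
            Option.getD_some]
          rw [assemble_eq]
        · exact ih (ids.insert m v) (index + 1) hidx' hv'
    · -- non-matching element: untouched on both sides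
      have hg' : (PySem.Str.isIn "gvadetect" e || PySem.Str.isIn "gvaclassify" e) = false :=
        Bool.not_eq_true _ ▸ eq_false_of_ne_true hg
      have hstep : bRegisterStep ids e = ids := by
        simp only [bRegisterStep, hg', if_false, Bool.false_eq_true]
      have hrend : ∀ F, bRender F e = e := fun F => by
        simp only [bRender, hg', if_false, Bool.false_eq_true]
      simp only [addInstanceIdsLoop, hg', Bool.false_eq_true, if_false, List.foldl_cons,
        List.map_cons, hstep, hrend]
      rw [ih ids index hidx hv]

-- ===== VERDICT (by name: the statement is the Claim_ definition above) =====
theorem add_instance_ids_spec : Claim_equal_add_instance_ids := by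
  intro pipeline _ _
  unfold Spec_add_instance_ids add_instance_ids add_instance_ids_alt
  exact loop_eq pipeline PySem.Dict.empty 0 (by rfl)
    (fun k s h => by simp [PySem.Dict.get?_empty] at h)
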